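-- pv_equiv track=rewrite | github.com/NlightN22/xray-p2p | tests/host/linux/_helpers.py | _sanitize_label
-- ===== SOURCE A (Python) =====
-- def _sanitize_label(value: str) -> str:
--     cleaned = value.strip().lower()
--     result = []
--     last_dash = False
--     for char in cleaned:
--         if char.isalnum():
--             result.append(char)
--             last_dash = False
--             continue
--         if char == "-" and not last_dash:
--             result.append("-")
--             last_dash = True
--             continue
--         if not last_dash:
--             result.append("-")
--             last_dash = True
--     return "".join(result).strip("-")
-- ===== SOURCE B (Python) =====
-- def _pieces(s):
--     if not s:
--         return []
--     k = s[0].isalnum()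
--     run = 1
--     while run < len(s) and s[run].isalnum() == k:
--         run += 1
--     return [s[:run] if k else "-"] + _pieces(s[run:])
--
--
-- def _sanitize_label(value: str) -> str:
--     cleaned = value.strip().lower()
--     return "".join(_pieces(cleaned)).strip("-")
-- ===== Notes on version B (the rewrite author's own statement) =====
-- stated objective: alternative
-- what changed: Replaces the char-by-char loop with a last_dash flag by a run-based decomposition: split the cleaned string into maximal runs of alnum/non-alnum characters, map each alnum run to itself and each non-alnum run to a single '-', join and strip '-'.
import Mathlib
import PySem

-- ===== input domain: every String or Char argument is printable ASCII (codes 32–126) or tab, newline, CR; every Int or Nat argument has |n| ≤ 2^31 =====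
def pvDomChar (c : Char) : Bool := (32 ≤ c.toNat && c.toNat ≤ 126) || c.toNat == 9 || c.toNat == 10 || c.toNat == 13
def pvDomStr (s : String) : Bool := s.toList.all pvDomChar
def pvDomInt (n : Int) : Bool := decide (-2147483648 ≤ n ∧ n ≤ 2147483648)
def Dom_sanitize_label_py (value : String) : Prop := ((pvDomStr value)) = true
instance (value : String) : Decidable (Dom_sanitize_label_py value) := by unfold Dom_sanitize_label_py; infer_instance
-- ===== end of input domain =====

-- B replaces A's char-by-char loop with a last_dash flag by a run-based decomposition
-- (maximal alnum / non-alnum runs, each non-alnum run mapped to one '-'); objective: alternative.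

-- ===== PORT A =====
-- the loop body of A: state = (result, last_dash)
def pvStepA (st : List Char × Bool) (c : Char) : List Char × Bool :=
  if PySem.Chars.isalnum c then (st.1 ++ [c], false)
  else if c == '-' && !st.2 then (st.1 ++ ['-'], true)
  else if !st.2 then (st.1 ++ ['-'], true)
  else st

def sanitize_label_py (value : String) : String :=
  let cleaned := PySem.Str.lower (PySem.Str.strip value)
  let r := cleaned.toList.foldl pvStepA ([], false)
  String.ofList (PySem.Chars.stripChars r.1 ['-'])

-- ===== PORT B =====
-- the 'while run < len(s) and s[run].isalnum() == k' scan of Source B: run length minus one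
def pvRunLen (k : Bool) : List Char → Nat
  | [] => 0
  | c :: cs => if PySem.Chars.isalnum c == k then 1 + pvRunLen k cs else 0

-- _pieces of Source B: split into maximal runs; an alnum run stays, a non-alnum run becomes "-"
def pvPieces : List Char → List (List Char)
  | [] => []
  | c :: cs =>
    let k := PySem.Chars.isalnum c
    let run := 1 + pvRunLen k cs
    (if k then (c :: cs).take run else ['-']) :: pvPieces ((c :: cs).drop run)
  termination_by cs => cs.length
  decreasing_by simp

def sanitize_label_py_alt (value : String) : String :=
  let cleaned := PySem.Str.lower (PySem.Str.strip value)
  String.ofList (PySem.Chars.stripChars (PySem.Chars.join [] (pvPieces cleaned.toList)) ['-'])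

-- ===== PRECONDITION & SPEC =====
def Spec_sanitize_label_py (value : String) (out : String) : Prop := out = sanitize_label_py_alt value
instance (value : String) (out : String) : Decidable (Spec_sanitize_label_py value out) := by unfold Spec_sanitize_label_py; infer_instance

-- ===== CLAIM (what is proved, stated in full; the proofs are below) =====
def Claim_equal_sanitize_label_py : Prop := ∀ (value : String), Dom_sanitize_label_py value → Spec_sanitize_label_py value (sanitize_label_py value)

-- ===== LEMMAS AND PROOFS =====

theorem pvPieces_nil : pvPieces [] = [] := by rw [pvPieces.eq_def]

theorem pvPieces_cons (c : Char) (cs : List Char) : pvPieces (c :: cs) =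
    (if PySem.Chars.isalnum c then (c :: cs).take (1 + pvRunLen (PySem.Chars.isalnum c) cs) else ['-'])
      :: pvPieces ((c :: cs).drop (1 + pvRunLen (PySem.Chars.isalnum c) cs)) := by
  rw [pvPieces.eq_def]

-- ''.join is concatenation
theorem pv_join_nil (l : List (List Char)) : PySem.Chars.join [] l = l.flatten := by
  induction l with
  | nil => rfl
  | cons a t ih =>
    cases t with
    | nil => simp [PySem.Chars.join, List.intercalate, List.intersperse]
    | cons b t' => simp_all [PySem.Chars.join, List.intercalate, List.intersperse]

-- the run scan is takeWhile's length
theorem pv_runLen_eq (k : Bool) (cs : List Char) :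
    pvRunLen k cs = (cs.takeWhile (fun x => PySem.Chars.isalnum x == k)).length := by
  induction cs with
  | nil => rfl
  | cons c cs ih =>
    by_cases h : PySem.Chars.isalnum c = k <;>
      simp [pvRunLen, h, ih] <;> omega

theorem pv_drop_takeWhile (p : Char → Bool) (l : List Char) :
    l.drop (l.takeWhile p).length = l.dropWhile p := by
  nth_rewrite 2 [← List.takeWhile_append_dropWhile (p := p) (l := l)]
  exact List.drop_left

-- A's loop over an all-alnum run, from last_dash = false: appends the run
theorem pv_fold_alnum (g : List Char) (res : List Char)
    (h : ∀ c ∈ g, PySem.Chars.isalnum c = true) :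
    g.foldl pvStepA (res, false) = (res ++ g, false) := by
  induction g generalizing res with
  | nil => simp
  | cons c g ih =>
    have hc : PySem.Chars.isalnum c = true := h c (by simp)
    simp only [List.foldl_cons, pvStepA, hc, if_pos]
    rw [ih (res ++ [c]) (fun x hx => h x (by simp [hx]))]
    simp

-- one non-alnum char from last_dash = false: appends '-' (both of A's dash branches agree)
theorem pv_step_nonalnum (c : Char) (res : List Char) (hc : PySem.Chars.isalnum c = false) :
    pvStepA (res, false) c = (res ++ ['-'], true) := by
  by_cases h : c = '-'
  · subst h; simp [pvStepA, hc]
  · simp [pvStepA, hc, h]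

-- A's loop over an all-non-alnum run, from last_dash = true: no-op
theorem pv_fold_nonalnum (g : List Char) (res : List Char)
    (h : ∀ c ∈ g, PySem.Chars.isalnum c = false) :
    g.foldl pvStepA (res, true) = (res, true) := by
  induction g with
  | nil => rfl
  | cons c g ih =>
    have hc := h c (by simp)
    simp only [List.foldl_cons, pvStepA, hc]
    simp only [Bool.false_eq_true, if_false, Bool.not_true, Bool.and_false]
    exact ih (fun x hx => h x (by simp [hx]))

-- when the next char is alnum, the incoming last_dash flag is irrelevant
theorem pv_fold_flag (c : Char) (cs res : List Char) (hc : PySem.Chars.isalnum c = true) :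
    (c :: cs).foldl pvStepA (res, true) = (c :: cs).foldl pvStepA (res, false) := by
  simp [pvStepA, hc]

-- main invariant: A's loop produces exactly the concatenation of B's pieces
theorem pv_main : ∀ (n : Nat) (cs : List Char), cs.length ≤ n → ∀ res : List Char,
    (cs.foldl pvStepA (res, false)).1 = res ++ (pvPieces cs).flatten := by
  intro n
  induction n with
  | zero =>
    intro cs h res
    have : cs = [] := List.eq_nil_of_length_eq_zero (Nat.le_zero.mp h)
    subst this; simp [pvPieces_nil]
  | succ n ih =>
    intro cs hlen res
    match cs with
    | [] => simp [pvPieces_nil]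
    | c :: cs =>
      have hlen' : cs.length ≤ n := by simpa using hlen
      have htake : (c :: cs).take (1 + pvRunLen (PySem.Chars.isalnum c) cs)
          = c :: cs.takeWhile (fun x => PySem.Chars.isalnum x == PySem.Chars.isalnum c) := by
        rw [Nat.add_comm, List.take_succ_cons, pv_runLen_eq]
        congr 1
        exact (List.prefix_iff_eq_take.mp (List.takeWhile_prefix _)).symm
      have hdrop : (c :: cs).drop (1 + pvRunLen (PySem.Chars.isalnum c) cs)
          = cs.dropWhile (fun x => PySem.Chars.isalnum x == PySem.Chars.isalnum c) := by
        rw [Nat.add_comm, List.drop_succ_cons, pv_runLen_eq]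
        exact pv_drop_takeWhile _ _
      have hsplit : c :: cs
          = (c :: cs.takeWhile (fun x => PySem.Chars.isalnum x == PySem.Chars.isalnum c))
            ++ cs.dropWhile (fun x => PySem.Chars.isalnum x == PySem.Chars.isalnum c) := by
        conv_lhs => rw [← List.take_append_drop (1 + pvRunLen (PySem.Chars.isalnum c) cs) (c :: cs)]
        rw [htake, hdrop]
      have hrestlen : (cs.dropWhile (fun x => PySem.Chars.isalnum x == PySem.Chars.isalnum c)).length ≤ n :=
        le_trans (List.length_dropWhile_le _ _) hlen'
      rw [pvPieces_cons, htake, hdrop]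
      conv_lhs => rw [hsplit, List.foldl_append]
      by_cases hk : PySem.Chars.isalnum c = true
      · -- alnum run
        rw [if_pos hk]
        rw [pv_fold_alnum (c :: cs.takeWhile (fun x => PySem.Chars.isalnum x == PySem.Chars.isalnum c)) res (by
          intro x hx
          rcases List.mem_cons.mp hx with hx | hx
          · subst hx; exact hk
          · have := List.mem_takeWhile_imp hx
            simp only [beq_iff_eq] at this; rw [this]; exact hk)]
        rw [ih _ hrestlen _]
        simp
      · -- non-alnum run: one '-' appended, the rest of the run skipped
        have hkf : PySem.Chars.isalnum c = false := Bool.eq_false_iff.mpr hk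
        rw [if_neg hk]
        have hallf : ∀ x ∈ cs.takeWhile (fun x => PySem.Chars.isalnum x == PySem.Chars.isalnum c),
            PySem.Chars.isalnum x = false := by
          intro x hx
          have := List.mem_takeWhile_imp hx
          simp only [beq_iff_eq] at this; rw [this]; exact hkf
        have hstep : List.foldl pvStepA (res, false)
            (c :: cs.takeWhile (fun x => PySem.Chars.isalnum x == PySem.Chars.isalnum c))
            = (res ++ ['-'], true) := by
          rw [List.foldl_cons, pv_step_nonalnum c res hkf]
          exact pv_fold_nonalnum _ _ hallf
        rw [hstep]
        match hrw : cs.dropWhile (fun x => PySem.Chars.isalnum x == PySem.Chars.isalnum c) with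
        | [] => simp [pvPieces_nil]
        | c' :: rest' =>
          have hc' : PySem.Chars.isalnum c' = true := by
            have hh := List.head?_dropWhile_not (fun x => PySem.Chars.isalnum x == PySem.Chars.isalnum c) cs
            rw [hrw] at hh
            simp only [List.head?_cons] at hh
            cases hval : PySem.Chars.isalnum c'
            · exfalso
              simp [hval, hkf] at hh
            · rfl
          rw [pv_fold_flag c' rest' _ hc']
          rw [ih (c' :: rest') (hrw ▸ hrestlen) (res ++ ['-'])]
          simp

-- ===== VERDICT (by name: the statement is the Claim_ definition above) =====
theorem sanitize_label_py_spec : Claim_equal_sanitize_label_py := by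
  intro value _
  unfold Spec_sanitize_label_py sanitize_label_py sanitize_label_py_alt
  simp only [pv_join_nil]
  rw [pv_main (PySem.Str.lower (PySem.Str.strip value)).toList.length _ le_rfl []]
  simp
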